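-- pv_equiv track=rewrite | github.com/Cara-Framework/core | cara/http/response/ContentTypeDetector.py | _is_html
-- ===== SOURCE A (Python) =====
-- def _is_html(content: str) -> bool:
--     """
--     Check if content appears to be HTML.
--
--     Args:
--         content: Content to check
--
--     Returns:
--         bool: True if content appears to be HTML
--     """
--     content_lower = content.lower()
--
--     # Check for HTML document declarations
--     if content_lower.startswith("<!doctype html"):
--         return True
--     if content_lower.startswith("<html"):
--         return True
--
--     # Check for common HTML tags
--     html_indicators = [
--         "<head>",
--         "<body>",
--         "<div>",
--         "<span>",
--         "<p>",
--         "<h1>",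
--         "<h2>",
--         "<h3>",
--         "<h4>",
--         "<h5>",
--         "<h6>",
--         "<title>",
--         "<meta",
--         "<link",
--         "<script",
--         "<style",
--     ]
--
--     return any(indicator in content_lower for indicator in html_indicators)
-- ===== SOURCE B (Python) =====
-- _HTML_TAGS = ["<head>", "<body>", "<div>", "<span>", "<p>", "<h1>", "<h2>", "<h3>",
--               "<h4>", "<h5>", "<h6>", "<title>", "<meta", "<link", "<script", "<style"]
--
--
-- def _build_trie(words):
--     root = {}
--     for w in words:
--         node = root
--         for ch in w:
--             node = node.setdefault(ch, {})
--         node["#"] = True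
--     return root
--
--
-- _TRIE = _build_trie(_HTML_TAGS)
--
--
-- def _is_html(content: str) -> bool:
--     cl = content.lower()
--     if cl.startswith("<!doctype html") or cl.startswith("<html"):
--         return True
--     n = len(cl)
--     for i in range(n):
--         node = _TRIE
--         j = i
--         while True:
--             if "#" in node:
--                 return True
--             nxt = node.get(cl[j]) if j < n else None
--             if nxt is None:
--                 break
--             node = nxt
--             j += 1
--     return False
-- ===== Notes on version B (the rewrite author's own statement) =====
-- stated objective: alternative
-- what changed: Replaces A's sixteen independent substring-membership scans with a prefix trie of the tag indicators built once and matched in a single left-to-right pass over the lowercased content.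
import Mathlib
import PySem

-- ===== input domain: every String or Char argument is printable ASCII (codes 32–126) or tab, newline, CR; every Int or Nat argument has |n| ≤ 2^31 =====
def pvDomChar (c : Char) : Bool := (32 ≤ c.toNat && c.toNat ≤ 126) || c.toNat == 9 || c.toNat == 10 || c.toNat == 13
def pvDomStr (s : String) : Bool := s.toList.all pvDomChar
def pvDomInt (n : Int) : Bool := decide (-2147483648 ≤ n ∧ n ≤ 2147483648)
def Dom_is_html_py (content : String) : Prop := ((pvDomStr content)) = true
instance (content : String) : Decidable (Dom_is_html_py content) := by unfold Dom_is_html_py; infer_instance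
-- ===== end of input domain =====

-- B builds a prefix trie of the sixteen tag indicators once and matches it in a single
-- left-to-right pass over the lowercased content, instead of A's sixteen independent
-- substring scans (objective: alternative, same asymptotic cost).

-- ===== PORT A =====
-- A's html_indicators list, in A's order
def htmlIndicators : List (List Char) :=
  ["<head>".toList, "<body>".toList, "<div>".toList, "<span>".toList, "<p>".toList,
   "<h1>".toList, "<h2>".toList, "<h3>".toList, "<h4>".toList, "<h5>".toList,
   "<h6>".toList, "<title>".toList, "<meta".toList, "<link".toList,
   "<script".toList, "<style".toList]

def is_html_py (content : String) : Bool :=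
  let cl := PySem.Chars.lower content.toList
  if PySem.Chars.startswith cl "<!doctype html".toList then true
  else if PySem.Chars.startswith cl "<html".toList then true
  else htmlIndicators.any (fun ind => PySem.Chars.isIn ind cl)

-- ===== PORT B =====
-- B's _HTML_TAGS list
def htmlTagsB : List (List Char) :=
  ["<head>".toList, "<body>".toList, "<div>".toList, "<span>".toList, "<p>".toList,
   "<h1>".toList, "<h2>".toList, "<h3>".toList, "<h4>".toList, "<h5>".toList,
   "<h6>".toList, "<title>".toList, "<meta".toList, "<link".toList,
   "<script".toList, "<style".toList]

-- Source B's dict-of-dicts trie in first-child / next-sibling form (an explicit child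
-- pointer instead of a nested 'List (Char × Trie)', which Lean's kernel refuses);
-- 'acc' is Source B's "#" accept mark on the node reached by the last character.
inductive Trie where
  | nil : Trie
  | node : Char → Bool → Trie → Trie → Trie
deriving DecidableEq, Repr

-- Source B's chain of 'setdefault' calls on absent keys: the fresh branch for one word
def ofWord : List Char → Trie
  | [] => .nil
  | [c] => .node c true .nil .nil
  | c :: r :: rs => .node c false (ofWord (r :: rs)) .nil

-- Source B's _build_trie inner loop: insert one word into the trie
def insertT : Trie → List Char → Trie
  | .nil, w => ofWord w
  | .node c a ch sb, [] => .node c a ch sb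
  | .node c a ch sb, x :: rest =>
      if x = c then
        match rest with
        | [] => .node c true ch sb
        | _ :: _ => .node c a (insertT ch rest) sb
      else .node c a ch (insertT sb (x :: rest))

-- Source B's _TRIE = _build_trie(_HTML_TAGS)
def tagTrie : Trie := List.foldl insertT .nil htmlTagsB

-- Source B's inner 'while True' descent starting at position i: does some accepted word
-- of the trie start here?
def tmatch : Trie → List Char → Bool
  | .nil, _ => false
  | .node c acc ch sb, l =>
      (match l with
       | [] => false
       | x :: rest => if x = c then (acc || tmatch ch rest) else false) || tmatch sb l

-- Source B's 'for i in range(n)' loop over the start positions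
def scanTrie (t : Trie) : List Char → Bool
  | [] => false
  | c :: rest => tmatch t (c :: rest) || scanTrie t rest

def is_html_py_alt (content : String) : Bool :=
  let cl := PySem.Chars.lower content.toList
  if PySem.Chars.startswith cl "<!doctype html".toList ||
     PySem.Chars.startswith cl "<html".toList then true
  else scanTrie tagTrie cl

-- ===== PRECONDITION & SPEC =====
def Spec_is_html_py (content : String) (out : Bool) : Prop := out = is_html_py_alt content
instance (content : String) (out : Bool) : Decidable (Spec_is_html_py content out) := by unfold Spec_is_html_py; infer_instance

-- ===== CLAIM (what is proved, stated in full; the proofs are below) =====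
def Claim_equal_is_html_py : Prop := ∀ (content : String), Dom_is_html_py content → Spec_is_html_py content (is_html_py content)

-- ===== LEMMAS AND PROOFS =====

-- definitional equations for insertT and tmatch, in the shapes the proofs rewrite with
theorem insertT_nil (w : List Char) : insertT .nil w = ofWord w := rfl
theorem insertT_node_eq (c : Char) (a : Bool) (ch sb : Trie) (x : Char) (rest : List Char) :
    insertT (.node c a ch sb) (x :: rest) =
      if x = c then
        (match rest with
         | [] => Trie.node c true ch sb
         | _ :: _ => Trie.node c a (insertT ch rest) sb)
      else Trie.node c a ch (insertT sb (x :: rest)) := rfl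
theorem tmatch_nil (l : List Char) : tmatch .nil l = false := rfl
theorem tmatch_node_nil (c : Char) (a : Bool) (ch sb : Trie) :
    tmatch (.node c a ch sb) [] = tmatch sb [] := by simp [tmatch]
theorem tmatch_node_cons (c : Char) (a : Bool) (ch sb : Trie) (x : Char) (l : List Char) :
    tmatch (.node c a ch sb) (x :: l) =
      ((if x = c then (a || tmatch ch l) else false) || tmatch sb (x :: l)) := rfl

-- the fresh branch for a nonempty word matches exactly that word's prefix test
theorem tmatch_ofWord : ∀ (w l : List Char), w ≠ [] →
    tmatch (ofWord w) l = w.isPrefixOf l := by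
  intro w
  induction w with
  | nil => intro l h; exact absurd rfl h
  | cons c rest ih =>
      intro l _
      cases rest with
      | nil =>
          cases l with
          | nil => simp [ofWord, tmatch_node_nil, tmatch_nil, List.isPrefixOf]
          | cons x lr =>
              rw [show ofWord [c] = .node c true .nil .nil from rfl,
                tmatch_node_cons, tmatch_nil]
              by_cases hx : x = c
              · simp [hx, List.isPrefixOf]
              · simp [hx, tmatch_nil, List.isPrefixOf, beq_eq_false_iff_ne.mpr (Ne.symm hx)]
      | cons r rs =>
          cases l with
          | nil => simp [ofWord, tmatch_node_nil, tmatch_nil, List.isPrefixOf]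
          | cons x lr =>
              rw [show ofWord (c :: r :: rs) = .node c false (ofWord (r :: rs)) .nil from rfl,
                tmatch_node_cons, tmatch_nil, ih lr (by simp)]
              by_cases hx : x = c
              · simp [hx, List.isPrefixOf]
              · simp [hx, List.isPrefixOf, beq_eq_false_iff_ne.mpr (Ne.symm hx)]

-- inserting a nonempty word adds exactly its prefix test to the trie's matches
theorem tmatch_insert : ∀ (t : Trie) (w l : List Char), w ≠ [] →
    tmatch (insertT t w) l = (w.isPrefixOf l || tmatch t l) := by
  intro t
  induction t with
  | nil => intro w l hw; simp [insertT_nil, tmatch_nil, tmatch_ofWord w l hw]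
  | node c a ch sb ihc ihs =>
      intro w l hw
      cases w with
      | nil => exact absurd rfl hw
      | cons x rest =>
          rw [insertT_node_eq]
          by_cases hx : x = c
          · subst hx
            rw [if_pos rfl]
            cases rest with
            | nil =>
                cases l with
                | nil => simp [tmatch_node_nil, List.isPrefixOf]
                | cons y lr =>
                    rw [tmatch_node_cons, tmatch_node_cons]
                    by_cases hy : y = x
                    · subst hy; simp [List.isPrefixOf]
                    · rw [if_neg hy, if_neg hy]
                      simp [List.isPrefixOf, beq_eq_false_iff_ne.mpr (Ne.symm hy)]
            | cons r rs =>
                cases l with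
                | nil => simp [tmatch_node_nil, List.isPrefixOf]
                | cons y lr =>
                    rw [tmatch_node_cons, tmatch_node_cons]
                    by_cases hy : y = x
                    · subst hy
                      rw [if_pos rfl, if_pos rfl, ihc (r :: rs) lr (by simp)]
                      simp [List.isPrefixOf, Bool.or_assoc, Bool.or_comm, Bool.or_left_comm]
                    · rw [if_neg hy, if_neg hy]
                      simp [List.isPrefixOf, beq_eq_false_iff_ne.mpr (Ne.symm hy)]
          · rw [if_neg hx]
            cases l with
            | nil =>
                rw [tmatch_node_nil, tmatch_node_nil,
                  ihs (x :: rest) [] (by simp)]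
            | cons y lr =>
                rw [tmatch_node_cons, tmatch_node_cons,
                  ihs (x :: rest) (y :: lr) (by simp)]
                simp [Bool.or_assoc, Bool.or_comm]

-- folding the insertions in: the built trie matches a list of nonempty words as prefixes
theorem tmatch_foldl : ∀ (ws : List (List Char)), (∀ w ∈ ws, w ≠ []) →
    ∀ (t : Trie) (l : List Char),
    tmatch (List.foldl insertT t ws) l = (ws.any (fun w => w.isPrefixOf l) || tmatch t l) := by
  intro ws
  induction ws with
  | nil => intro _ t l; simp
  | cons w ws ih =>
      intro h t l
      simp only [List.foldl_cons, List.any_cons]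
      rw [ih (fun u hu => h u (by simp [hu])) (insertT t w) l,
        tmatch_insert t w l (h w (by simp))]
      cases w.isPrefixOf l <;> cases tmatch t l <;> simp

theorem htmlTagsB_ne_nil : ∀ w ∈ htmlTagsB, w ≠ ([] : List Char) := by decide

-- the built trie decides "some tag starts here"
theorem tmatch_tagTrie (l : List Char) :
    tmatch tagTrie l = htmlTagsB.any (fun w => w.isPrefixOf l) := by
  rw [tagTrie, tmatch_foldl htmlTagsB htmlTagsB_ne_nil Trie.nil l, tmatch_nil]
  simp

-- the position-by-position trie scan decides "some tag is an infix"
theorem scanTrie_eq_any_isIn (l : List Char) :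
    scanTrie tagTrie l = htmlTagsB.any (fun t => PySem.Chars.isIn t l) := by
  induction l with
  | nil =>
      simp only [scanTrie]
      symm
      simp only [List.any_eq_false]
      intro t ht hin
      rw [PySem.Chars.isIn_iff_infix, List.infix_nil] at hin
      exact htmlTagsB_ne_nil t ht hin
  | cons c rest ih =>
      simp only [scanTrie, ih, tmatch_tagTrie]
      rw [Bool.eq_iff_iff]
      simp only [Bool.or_eq_true, List.any_eq_true, List.isPrefixOf_iff_prefix,
        PySem.Chars.isIn_iff_infix, List.infix_cons_iff]
      constructor
      · rintro (⟨t, ht, hp⟩ | ⟨t, ht, hi⟩)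
        · exact ⟨t, ht, Or.inl hp⟩
        · exact ⟨t, ht, Or.inr hi⟩
      · rintro ⟨t, ht, hp | hi⟩
        · exact Or.inl ⟨t, ht, hp⟩
        · exact Or.inr ⟨t, ht, hi⟩

-- ===== VERDICT (by name: the statement is the Claim_ definition above) =====
theorem is_html_py_spec : Claim_equal_is_html_py := by
  intro content _
  unfold Spec_is_html_py is_html_py is_html_py_alt
  simp only []
  rw [scanTrie_eq_any_isIn]
  cases PySem.Chars.startswith (PySem.Chars.lower content.toList) "<!doctype html".toList <;>
    cases PySem.Chars.startswith (PySem.Chars.lower content.toList) "<html".toList <;>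
      simp [htmlIndicators, htmlTagsB]
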